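-- pv_equiv track=rewrite | github.com/GuillaumeC0lin/deep-journey | projectDungeoneering/code/tools/grid_maker.py | make_big_corridor
-- ===== SOURCE A (Python) =====
-- def make_big_corridor(grid,length,pos,dir): # dir is 1-4 on a 4 pointed counterclockwise star pattern starting from the top
--     grid_copy = [row[:] for row in grid]
--     for i in range(len(grid)):
--         for j in range(len(grid[0])):
--             match(dir):
--                 case 3:
--                     if i>= pos[0] and i<pos[0]+length:
--                         if j == pos[1]+1:
--                             grid_copy[i] = grid_copy[i][:j] + "." + grid_copy[i][j + 1:]
--                         if j == pos[1]:
--                             grid_copy[i] = grid_copy[i][:j] + "W" + grid_copy[i][j + 1:]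
--                 case 1:
--                     if i>= pos[0]-length and i<pos[0]:
--                         if j == pos[1]:
--                             grid_copy[i] = grid_copy[i][:j] + "." + grid_copy[i][j + 1:]
--                         if j == pos[1]+1:
--                             grid_copy[i] = grid_copy[i][:j] + "W" + grid_copy[i][j + 1:]
--                 case 4:
--                     if j>= pos[1] and j<pos[1]+length:
--                         if i == pos[0]:
--                             grid_copy[i] = grid_copy[i][:j] + "." + grid_copy[i][j + 1:]
--                         if i == pos[0]+1:
--                             grid_copy[i] = grid_copy[i][:j] + "W" + grid_copy[i][j + 1:]
--                 case 2:
--                     if j>= pos[1]-length and j<pos[1]: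
--                         if i == pos[0]+1:
--                             grid_copy[i] = grid_copy[i][:j] + "." + grid_copy[i][j + 1:]
--                         if i == pos[0]:
--                             grid_copy[i] = grid_copy[i][:j] + "W" + grid_copy[i][j + 1:]
--     return grid_copy
-- ===== SOURCE B (Python) =====
-- def make_big_corridor(grid, length, pos, dir):
--     out = list(grid)
--     if dir not in (1, 2, 3, 4) or not grid or not grid[0]:
--         return out
--     rows, cols = len(grid), len(grid[0])
--     r, c = pos[0], pos[1]
--
--     def put(i, j, ch):
--         # write one cell, clamped to the grid bounds
--         if 0 <= i < rows and 0 <= j < cols: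
--             out[i] = out[i][:j] + ch + out[i][j + 1:]
--
--     def splice(i, a, b, ch):
--         # write a horizontal run ch over columns [a, b), clamped
--         a, b = max(a, 0), min(b, cols)
--         if 0 <= i < rows and a < b:
--             out[i] = out[i][:a] + ch * (b - a) + out[i][b:]
--
--     if dir == 1:
--         for i in range(max(r - length, 0), min(r, rows)):
--             put(i, c, ".")
--             put(i, c + 1, "W")
--     elif dir == 3:
--         for i in range(max(r, 0), min(r + length, rows)):
--             put(i, c, "W")
--             put(i, c + 1, ".")
--     elif dir == 2:
--         splice(r, c - length, c, "W")
--         splice(r + 1, c - length, c, ".")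
--     else:
--         splice(r, c, c + length, ".")
--         splice(r + 1, c, c + length, "W")
--     return out
-- ===== Notes on version B (the rewrite author's own statement) =====
-- stated objective: faster
-- what changed: Instead of scanning every (i,j) cell of the grid and testing corridor-membership per cell, B writes only the affected cells: for vertical dirs (1/3) it loops over the clamped row range writing the two cells per row, and for horizontal dirs (2/4) it splices the whole corridor and wall runs into the two affected rows with one string-slice operation each.
-- outside the precondition, e.g. on make_big_corridor(['ab'], 0, (0,), 3): A returns ['ab'], B raises IndexError
import Mathlib
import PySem

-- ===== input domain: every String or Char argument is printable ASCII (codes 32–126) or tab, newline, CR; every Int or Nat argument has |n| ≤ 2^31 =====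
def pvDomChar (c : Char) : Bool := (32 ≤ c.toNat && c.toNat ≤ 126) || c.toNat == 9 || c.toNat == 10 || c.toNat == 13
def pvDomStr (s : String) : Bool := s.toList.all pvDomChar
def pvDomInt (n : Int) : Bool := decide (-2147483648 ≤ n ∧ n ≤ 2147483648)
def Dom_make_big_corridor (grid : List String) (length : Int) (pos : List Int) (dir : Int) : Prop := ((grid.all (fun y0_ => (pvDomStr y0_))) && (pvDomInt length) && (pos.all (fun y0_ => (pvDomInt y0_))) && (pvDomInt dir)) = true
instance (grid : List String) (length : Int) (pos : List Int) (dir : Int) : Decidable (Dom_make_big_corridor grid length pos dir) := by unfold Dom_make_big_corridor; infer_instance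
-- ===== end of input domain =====

-- B writes only the carved cells instead of scanning the whole grid: a clamped row loop
-- with two cell writes per row for the vertical dirs, one string splice per affected row
-- for the horizontal dirs. Return values are equal on Pre_; neither Python mutates `grid`.

-- ===== PORT A =====
-- row[:j] + ch + row[j+1:]  (the identical cell-write expression both Pythons use)
def pvSet (s : String) (j : Int) (c : Char) : String :=
  String.ofList (PySem.List.slice s.toList none (some j) ++ c :: PySem.List.slice s.toList (some (j + 1)) none)

-- grid_copy[i] = grid_copy[i][:j] + ch + grid_copy[i][j+1:]
def pvWrite (g : List String) (i j : Int) (c : Char) : List String :=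
  g.set i.toNat (pvSet (PySem.List.pyGetD g i "") j c)

def make_big_corridor (grid : List String) (length : Int) (pos : List Int) (dir : Int) : List String :=
  (PySem.List.pyRange 0 (grid.length : Int) 1).foldl (fun gc i =>
    (PySem.List.pyRange 0 (PySem.Str.len (PySem.List.pyGetD grid 0 "")) 1).foldl (fun gc j =>
      if dir = 3 then
        (if PySem.List.pyGetD pos 0 0 ≤ i ∧ i < PySem.List.pyGetD pos 0 0 + length then
          let gc := if j = PySem.List.pyGetD pos 1 0 + 1 then pvWrite gc i j '.' else gc
          if j = PySem.List.pyGetD pos 1 0 then pvWrite gc i j 'W' else gc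
        else gc)
      else if dir = 1 then
        (if PySem.List.pyGetD pos 0 0 - length ≤ i ∧ i < PySem.List.pyGetD pos 0 0 then
          let gc := if j = PySem.List.pyGetD pos 1 0 then pvWrite gc i j '.' else gc
          if j = PySem.List.pyGetD pos 1 0 + 1 then pvWrite gc i j 'W' else gc
        else gc)
      else if dir = 4 then
        (if PySem.List.pyGetD pos 1 0 ≤ j ∧ j < PySem.List.pyGetD pos 1 0 + length then
          let gc := if i = PySem.List.pyGetD pos 0 0 then pvWrite gc i j '.' else gc
          if i = PySem.List.pyGetD pos 0 0 + 1 then pvWrite gc i j 'W' else gc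
        else gc)
      else if dir = 2 then
        (if PySem.List.pyGetD pos 1 0 - length ≤ j ∧ j < PySem.List.pyGetD pos 1 0 then
          let gc := if i = PySem.List.pyGetD pos 0 0 + 1 then pvWrite gc i j '.' else gc
          if i = PySem.List.pyGetD pos 0 0 then pvWrite gc i j 'W' else gc
        else gc)
      else gc) gc) grid

-- ===== PORT B =====
-- out[i][:a] + ch*(b-a) + out[i][b:]
def pvSplice (s : String) (a b : Int) (c : Char) : String :=
  String.ofList (PySem.List.slice s.toList none (some a) ++ List.replicate (b - a).toNat c ++ PySem.List.slice s.toList (some b) none)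

-- def put(i, j, ch)
def pvPut (rows cols : Int) (g : List String) (i j : Int) (c : Char) : List String :=
  if 0 ≤ i ∧ i < rows ∧ 0 ≤ j ∧ j < cols then pvWrite g i j c else g

-- def splice(i, a, b, ch)
def pvSpliceRow (rows cols : Int) (g : List String) (i a b : Int) (c : Char) : List String :=
  let a' := max a 0
  let b' := min b cols
  if (0 ≤ i ∧ i < rows) ∧ a' < b' then g.set i.toNat (pvSplice (PySem.List.pyGetD g i "") a' b' c) else g

def make_big_corridor_alt (grid : List String) (length : Int) (pos : List Int) (dir : Int) : List String :=
  if ¬(dir = 1 ∨ dir = 2 ∨ dir = 3 ∨ dir = 4) ∨ grid = [] ∨ PySem.List.pyGetD grid 0 "" = "" then grid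
  else
    let rows : Int := grid.length
    let cols : Int := PySem.Str.len (PySem.List.pyGetD grid 0 "")
    let r := PySem.List.pyGetD pos 0 0
    let c := PySem.List.pyGetD pos 1 0
    if dir = 1 then
      (PySem.List.pyRange (max (r - length) 0) (min r rows) 1).foldl
        (fun out i => pvPut rows cols (pvPut rows cols out i c '.') i (c + 1) 'W') grid
    else if dir = 3 then
      (PySem.List.pyRange (max r 0) (min (r + length) rows) 1).foldl
        (fun out i => pvPut rows cols (pvPut rows cols out i c 'W') i (c + 1) '.') grid
    else if dir = 2 then
      pvSpliceRow rows cols (pvSpliceRow rows cols grid r (c - length) c 'W') (r + 1) (c - length) c '.'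
    else
      pvSpliceRow rows cols (pvSpliceRow rows cols grid r c (c + length) '.') (r + 1) c (c + length) 'W'

-- ===== PRECONDITION & SPEC =====
-- Pre_ excludes calls where pos has fewer than two entries while the grid has cells and
-- dir is a real direction (1-4): there Python A reads pos[0]/pos[1] and raises IndexError
-- on all but accidental never-carved inputs, and B raises IndexError as well.
def Pre_make_big_corridor (grid : List String) (length : Int) (pos : List Int) (dir : Int) : Prop :=
  2 ≤ pos.length ∨ grid = [] ∨ grid.headD "" = "" ∨ (dir ≠ 1 ∧ dir ≠ 2 ∧ dir ≠ 3 ∧ dir ≠ 4)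
instance (grid : List String) (length : Int) (pos : List Int) (dir : Int) : Decidable (Pre_make_big_corridor grid length pos dir) := by unfold Pre_make_big_corridor; infer_instance

def pvWitness_make_big_corridor : List String × Int × List Int × Int := (["##", "##"], 1, [0, 0], 3)

def Spec_make_big_corridor (grid : List String) (length : Int) (pos : List Int) (dir : Int) (out : List String) : Prop := out = make_big_corridor_alt grid length pos dir
instance (grid : List String) (length : Int) (pos : List Int) (dir : Int) (out : List String) : Decidable (Spec_make_big_corridor grid length pos dir out) := by unfold Spec_make_big_corridor; infer_instance

-- ===== CLAIM (what is proved, stated in full; the proofs are below) =====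
def Claim_equal_make_big_corridor : Prop := ∀ (grid : List String) (length : Int) (pos : List Int) (dir : Int), Dom_make_big_corridor grid length pos dir → Pre_make_big_corridor grid length pos dir → Spec_make_big_corridor grid length pos dir (make_big_corridor grid length pos dir)

-- ===== LEMMAS AND PROOFS =====

theorem pv_foldl_fixed {β : Type} (l : List Int) (b : β) : l.foldl (fun a _ => a) b = b :=
  List.foldl_fixed l

theorem pv_twoPoint {β : Type} (f g : β → β) (a b : Int) (hab : a < b) (n : Nat) (init : β) :
    (PySem.List.pyRange 0 (n : Int) 1).foldl
        (fun s j => if j = a then f s else if j = b then g s else s) init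
      = (if 0 ≤ b ∧ b < (n : Int) then g (if 0 ≤ a ∧ a < (n : Int) then f init else init)
         else (if 0 ≤ a ∧ a < (n : Int) then f init else init)) := by
  induction n with
  | zero =>
      rw [PySem.List.pyRange_one_eq_nil (by omega)]
      simp only [List.foldl_nil]
      rw [if_neg (by omega), if_neg (by omega)]
  | succ n ih =>
      rw [show ((n+1 : Nat) : Int) = (n : Int) + 1 from by push_cast; ring,
        PySem.List.pyRange_one_succ_right (by omega), List.foldl_append, ih]
      simp only [List.foldl_cons, List.foldl_nil]
      split_ifs <;> first | rfl | omega

theorem pv_interval {β : Type} (f : β → Int → β) (lo hi : Int) (n : Nat) (init : β) :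
    (PySem.List.pyRange 0 (n : Int) 1).foldl (fun s j => if lo ≤ j ∧ j < hi then f s j else s) init
      = (PySem.List.pyRange (max lo 0) (min hi (n : Int)) 1).foldl f init := by
  induction n generalizing init with
  | zero =>
      rw [PySem.List.pyRange_one_eq_nil (by omega), PySem.List.pyRange_one_eq_nil (by omega)]
      rfl
  | succ n ih =>
      rw [show ((n+1 : Nat) : Int) = (n : Int) + 1 from by push_cast; ring,
        PySem.List.pyRange_one_succ_right (by omega), List.foldl_append, ih]
      simp only [List.foldl_cons, List.foldl_nil]
      by_cases hc : lo ≤ (n : Int) ∧ (n : Int) < hi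
      · rw [if_pos hc, show min hi ((n:Int)+1) = min hi (n:Int) + 1 from by omega,
          PySem.List.pyRange_one_succ_right (by omega), List.foldl_append]
        simp only [List.foldl_cons, List.foldl_nil]
        rw [show min hi (n:Int) = (n:Int) from by omega]
      · rw [if_neg hc]
        by_cases h2 : hi ≤ (n:Int)
        · rw [show min hi ((n:Int)+1) = min hi (n:Int) from by omega]
        · rw [PySem.List.pyRange_one_eq_nil (by omega), PySem.List.pyRange_one_eq_nil (by omega)]

theorem pv_take_write (a : Nat) (c : Char) (xs : List Char) :
    (xs.take a ++ c :: xs.drop (a+1)).take (a+1) = xs.take a ++ [c] := by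
  rw [List.take_append]
  by_cases h : a ≤ xs.length
  · rw [List.take_of_length_le (by rw [List.length_take]; omega), List.length_take,
      min_eq_left h, show a+1-a = 1 from by omega, List.take_succ_cons, List.take_zero]
  · have h' : xs.length ≤ a := by omega
    rw [List.take_of_length_le h', List.take_of_length_le (by omega : xs.length ≤ a+1),
      List.drop_eq_nil_of_le (by omega), List.take_of_length_le (by simp; omega)]

theorem pv_drop_write (a k : Nat) (c : Char) (xs : List Char) :
    (xs.take a ++ c :: xs.drop (a+1)).drop (a+1+k) = xs.drop (a+1+k) := by
  rw [List.drop_append]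
  by_cases h : a ≤ xs.length
  · rw [List.drop_eq_nil_of_le (by rw [List.length_take]; omega), List.length_take,
      min_eq_left h, show a+1+k-a = k+1 from by omega, List.drop_succ_cons, List.drop_drop]
    rw [show a+1+k = k+(a+1) from by omega]
    rfl
  · have h' : xs.length ≤ a := by omega
    rw [List.drop_eq_nil_of_le (by omega : xs.length ≤ a+1+k), List.take_of_length_le h',
      List.drop_eq_nil_of_le (by omega : xs.length ≤ a+1),
      List.drop_eq_nil_of_le (show ([c] : List Char).length ≤ a+1+k-xs.length from by simp; omega),
      List.append_nil, List.drop_eq_nil_of_le (by omega : xs.length ≤ a+1+k)]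

theorem pv_charRun (c : Char) (k : Nat) : ∀ (a : Nat) (cs : List Char),
    (PySem.List.pyRange (a : Int) ((a : Int) + (k : Int)) 1).foldl
        (fun cs j => cs.take j.toNat ++ c :: cs.drop (j.toNat + 1)) cs
      = cs.take a ++ List.replicate k c ++ cs.drop (a + k) := by
  induction k with
  | zero =>
      intro a cs
      rw [PySem.List.pyRange_one_eq_nil (by omega)]
      simp
  | succ k ih =>
      intro a cs
      rw [PySem.List.pyRange_one_cons (by omega)]
      simp only [List.foldl_cons]
      rw [show ((a:Int)).toNat = a from by omega,
        show (a:Int) + ((k+1:Nat) : Int) = ((a+1:Nat):Int) + (k:Int) from by push_cast; ring,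
        show (a:Int) + 1 = ((a+1:Nat) : Int) from by push_cast; ring,
        ih (a+1), pv_take_write, pv_drop_write a k c cs]
      simp [List.replicate_succ, List.append_assoc, show a+1+k = a+(k+1) from by omega]

theorem pv_toList_pvSet (s : String) (j : Int) (c : Char) (h : 0 ≤ j) :
    (pvSet s j c).toList = s.toList.take j.toNat ++ c :: s.toList.drop (j.toNat + 1) := by
  unfold pvSet
  rw [String.toList_ofList, PySem.List.slice_to s.toList h,
    PySem.List.slice_from s.toList (by omega : (0:Int) ≤ j + 1),
    show (j+1).toNat = j.toNat + 1 from by omega]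

theorem pv_fold_toList (c : Char) (l : List Int) (hl : ∀ j ∈ l, 0 ≤ j) : ∀ (s : String),
    (l.foldl (fun row j => pvSet row j c) s).toList
      = l.foldl (fun cs j => cs.take j.toNat ++ c :: cs.drop (j.toNat + 1)) s.toList := by
  induction l with
  | nil => intro s; rfl
  | cons x xs ih =>
      intro s
      simp only [List.foldl_cons]
      rw [ih (fun j hj => hl j (List.mem_cons_of_mem _ hj)) (pvSet s x c),
        pv_toList_pvSet s x c (hl x (List.mem_cons_self))]

theorem pv_strFold (s : String) (a b : Int) (c : Char) (h0 : 0 ≤ a) (hab : a ≤ b) :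
    (PySem.List.pyRange a b 1).foldl (fun row j => pvSet row j c) s = pvSplice s a b c := by
  apply String.toList_inj.mp
  rw [pv_fold_toList c _ (fun j hj => by
      have := PySem.List.mem_pyRange_one.mp hj; omega)]
  unfold pvSplice
  rw [String.toList_ofList, PySem.List.slice_to s.toList h0,
    PySem.List.slice_from s.toList (le_trans h0 hab),
    show PySem.List.pyRange a b 1
        = PySem.List.pyRange ((a.toNat : Nat) : Int) (((a.toNat : Nat) : Int) + (((b - a).toNat : Nat) : Int)) 1 from by
      congr 1 <;> omega,
    pv_charRun c (b - a).toNat a.toNat s.toList,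
    show a.toNat + (b - a).toNat = b.toNat from by omega]

theorem pv_getD_valid (g : List String) (i : Int) (h0 : 0 ≤ i) (h : i.toNat < g.length) :
    PySem.List.pyGetD g i "" = g[i.toNat] := by
  rw [PySem.List.pyGetD_of_nonneg g _ h0, List.getD_eq_getElem?_getD, List.getElem?_eq_getElem h]
  rfl

theorem pv_foldRow (ch : Char) (i : Int) (l : List Int) (h0 : 0 ≤ i) : ∀ (gc : List String),
    i.toNat < gc.length →
    l.foldl (fun s j => pvWrite s i j ch) gc
      = gc.set i.toNat (l.foldl (fun row j => pvSet row j ch) (PySem.List.pyGetD gc i "")) := by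
  induction l with
  | nil =>
      intro gc h
      simp only [List.foldl_nil]
      rw [pv_getD_valid gc i h0 h, List.set_getElem_self]
  | cons x xs ih =>
      intro gc h
      simp only [List.foldl_cons]
      rw [show pvWrite gc i x ch = gc.set i.toNat (pvSet (PySem.List.pyGetD gc i "") x ch) from rfl,
        ih _ (by simpa using h),
        pv_getD_valid (gc.set i.toNat (pvSet (PySem.List.pyGetD gc i "") x ch)) i h0 (by simpa using h),
        List.getElem_set_self, List.set_set]
theorem pv_length_pvSpliceRow (rows cols : Int) (g : List String) (i a b : Int) (c : Char) :
    (pvSpliceRow rows cols g i a b c).length = g.length := by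
  show (List.length (if (0 ≤ i ∧ i < rows) ∧ max a 0 < min b cols then g.set i.toNat (pvSplice (PySem.List.pyGetD g i "") (max a 0) (min b cols) c) else g)) = g.length
  split_ifs <;> simp

theorem pv_row (rows cols : Nat) (i loJ hiJ : Int) (ch : Char) (gc : List String)
    (hg : gc.length = rows) :
    (if 0 ≤ i ∧ i < (rows : Int) then
        (PySem.List.pyRange (max loJ 0) (min hiJ (cols : Int)) 1).foldl
          (fun s j => pvWrite s i j ch) gc
      else gc)
      = pvSpliceRow (rows : Int) (cols : Int) gc i loJ hiJ ch := by
  unfold pvSpliceRow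
  by_cases hi : 0 ≤ i ∧ i < (rows : Int)
  · rw [if_pos hi]
    by_cases hab : max loJ 0 < min hiJ (cols : Int)
    · rw [if_pos ⟨hi, hab⟩,
        pv_foldRow ch i _ hi.1 gc (by omega),
        pv_strFold _ _ _ _ (by omega : (0:Int) ≤ max loJ 0) (le_of_lt hab)]
    · rw [if_neg (by tauto), PySem.List.pyRange_one_eq_nil (by omega)]
      rfl
  · rw [if_neg hi, if_neg (by tauto)]
theorem pv_vert (lo hi cIdx : Int) (ch1 ch2 : Char) (rows cols : Nat) (g0 : List String) :
    (PySem.List.pyRange 0 (rows : Int) 1).foldl (fun gc i =>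
        (PySem.List.pyRange 0 (cols : Int) 1).foldl (fun gc j =>
          if lo ≤ i ∧ i < hi then
            (if j = cIdx then pvWrite gc i cIdx ch1
             else if j = cIdx + 1 then pvWrite gc i (cIdx + 1) ch2 else gc)
          else gc) gc) g0
      = (PySem.List.pyRange (max lo 0) (min hi (rows : Int)) 1).foldl
          (fun out i => pvPut (rows : Int) (cols : Int) (pvPut (rows : Int) (cols : Int) out i cIdx ch1) i (cIdx + 1) ch2) g0 := by
  have hbody : (fun (gc : List String) (i : Int) =>
      (PySem.List.pyRange 0 (cols : Int) 1).foldl (fun gc j =>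
          if lo ≤ i ∧ i < hi then
            (if j = cIdx then pvWrite gc i cIdx ch1
             else if j = cIdx + 1 then pvWrite gc i (cIdx + 1) ch2 else gc)
          else gc) gc)
      = (fun gc i => if lo ≤ i ∧ i < hi then
          (if 0 ≤ cIdx + 1 ∧ cIdx + 1 < (cols : Int) then
             pvWrite (if 0 ≤ cIdx ∧ cIdx < (cols : Int) then pvWrite gc i cIdx ch1 else gc) i (cIdx + 1) ch2
           else (if 0 ≤ cIdx ∧ cIdx < (cols : Int) then pvWrite gc i cIdx ch1 else gc))
        else gc) := by
    funext gc i
    by_cases hrc : lo ≤ i ∧ i < hi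
    · rw [if_pos hrc,
        show (fun (gc : List String) (j : Int) =>
            if lo ≤ i ∧ i < hi then
              (if j = cIdx then pvWrite gc i cIdx ch1
               else if j = cIdx + 1 then pvWrite gc i (cIdx + 1) ch2 else gc)
            else gc)
          = (fun gc j => if j = cIdx then pvWrite gc i cIdx ch1
               else if j = cIdx + 1 then pvWrite gc i (cIdx + 1) ch2 else gc) from by
          funext gc j; rw [if_pos hrc]]
      exact pv_twoPoint (fun s => pvWrite s i cIdx ch1) (fun s => pvWrite s i (cIdx + 1) ch2)
        cIdx (cIdx + 1) (by omega) cols gc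
    · rw [if_neg hrc,
        show (fun (gc : List String) (j : Int) =>
            if lo ≤ i ∧ i < hi then
              (if j = cIdx then pvWrite gc i cIdx ch1
               else if j = cIdx + 1 then pvWrite gc i (cIdx + 1) ch2 else gc)
            else gc)
          = (fun (gc : List String) (_ : Int) => gc) from by
          funext gc j; rw [if_neg hrc]]
      exact pv_foldl_fixed _ gc
  rw [hbody, pv_interval _ lo hi rows g0]
  apply PySem.List.foldl_congr_mem
  intro acc i hi_mem
  have hm := PySem.List.mem_pyRange_one.mp hi_mem
  unfold pvPut
  split_ifs <;> first | rfl | omega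

theorem pv_horiz (r loJ hiJ : Int) (ch1 ch2 : Char) (rows cols : Nat) (g0 : List String)
    (hg : g0.length = rows) :
    (PySem.List.pyRange 0 (rows : Int) 1).foldl (fun gc i =>
        (PySem.List.pyRange 0 (cols : Int) 1).foldl (fun gc j =>
          if loJ ≤ j ∧ j < hiJ then
            (if i = r then pvWrite gc r j ch1
             else if i = r + 1 then pvWrite gc (r + 1) j ch2 else gc)
          else gc) gc) g0
      = pvSpliceRow (rows : Int) (cols : Int)
          (pvSpliceRow (rows : Int) (cols : Int) g0 r loJ hiJ ch1) (r + 1) loJ hiJ ch2 := by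
  have hbody : (fun (gc : List String) (i : Int) =>
      (PySem.List.pyRange 0 (cols : Int) 1).foldl (fun gc j =>
          if loJ ≤ j ∧ j < hiJ then
            (if i = r then pvWrite gc r j ch1
             else if i = r + 1 then pvWrite gc (r + 1) j ch2 else gc)
          else gc) gc)
      = (fun gc i => if i = r then
            (PySem.List.pyRange (max loJ 0) (min hiJ (cols : Int)) 1).foldl (fun s j => pvWrite s r j ch1) gc
          else if i = r + 1 then
            (PySem.List.pyRange (max loJ 0) (min hiJ (cols : Int)) 1).foldl (fun s j => pvWrite s (r + 1) j ch2) gc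
          else gc) := by
    funext gc i
    by_cases h1 : i = r
    · subst h1
      rw [if_pos rfl,
        show (fun (gc : List String) (j : Int) =>
            if loJ ≤ j ∧ j < hiJ then
              (if i = i then pvWrite gc i j ch1
               else if i = i + 1 then pvWrite gc (i + 1) j ch2 else gc)
            else gc)
          = (fun gc j => if loJ ≤ j ∧ j < hiJ then pvWrite gc i j ch1 else gc) from by
          funext gc j; rw [if_pos rfl]]
      exact pv_interval (fun s j => pvWrite s i j ch1) loJ hiJ cols gc
    · by_cases h2 : i = r + 1
      · subst h2
        rw [if_neg h1, if_pos rfl,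
          show (fun (gc : List String) (j : Int) =>
              if loJ ≤ j ∧ j < hiJ then
                (if r + 1 = r then pvWrite gc r j ch1
                 else if r + 1 = r + 1 then pvWrite gc (r + 1) j ch2 else gc)
              else gc)
            = (fun gc j => if loJ ≤ j ∧ j < hiJ then pvWrite gc (r + 1) j ch2 else gc) from by
            funext gc j; rw [if_neg (show ¬(r + 1 = r) from by omega), if_pos rfl]]
        exact pv_interval (fun s j => pvWrite s (r + 1) j ch2) loJ hiJ cols gc
      · rw [if_neg h1, if_neg h2,
          show (fun (gc : List String) (j : Int) =>
              if loJ ≤ j ∧ j < hiJ then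
                (if i = r then pvWrite gc r j ch1
                 else if i = r + 1 then pvWrite gc (r + 1) j ch2 else gc)
              else gc)
            = (fun (gc : List String) (_ : Int) => gc) from by
            funext gc j; rw [if_neg h1, if_neg h2, ite_self]]
        exact pv_foldl_fixed _ gc
  rw [hbody, pv_twoPoint
      (fun gc => (PySem.List.pyRange (max loJ 0) (min hiJ (cols : Int)) 1).foldl (fun s j => pvWrite s r j ch1) gc)
      (fun gc => (PySem.List.pyRange (max loJ 0) (min hiJ (cols : Int)) 1).foldl (fun s j => pvWrite s (r + 1) j ch2) gc)
      r (r + 1) (by omega) rows g0,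
    pv_row rows cols r loJ hiJ ch1 g0 hg,
    pv_row rows cols (r + 1) loJ hiJ ch2 _ (by rw [pv_length_pvSpliceRow]; exact hg)]

-- ===== VERDICT (by name: the statement is the Claim_ definition above) =====
theorem make_big_corridor_spec : Claim_equal_make_big_corridor := by
  intro grid length pos dir _ _
  unfold Spec_make_big_corridor make_big_corridor make_big_corridor_alt
  by_cases hd : dir = 1 ∨ dir = 2 ∨ dir = 3 ∨ dir = 4
  · by_cases hg : grid = []
    · subst hg
      rw [if_pos (Or.inr (Or.inl rfl)), PySem.List.pyRange_one_eq_nil (by simp)]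
      rfl
    · by_cases he : PySem.List.pyGetD grid 0 "" = ""
      · rw [if_pos (Or.inr (Or.inr he)), he, show PySem.Str.len "" = 0 from by simp,
          PySem.List.pyRange_one_eq_nil (le_refl 0)]
        simp only [List.foldl_nil]
        exact pv_foldl_fixed _ grid
      · rw [if_neg (by simp only [not_or]; exact ⟨by tauto, hg, he⟩)]
        rw [show PySem.Str.len (PySem.List.pyGetD grid 0 "")
            = (((PySem.List.pyGetD grid 0 "").toList.length : Nat) : Int) from by simp]
        rcases hd with h1 | h2 | h3 | h4
        · rw [if_pos h1]
          refine Eq.trans ?_ (pv_vert (PySem.List.pyGetD pos 0 0 - length) (PySem.List.pyGetD pos 0 0) (PySem.List.pyGetD pos 1 0) '.' 'W'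
            grid.length (PySem.List.pyGetD grid 0 "").toList.length grid)
          apply PySem.List.foldl_congr_mem
          intro acc i _
          congr 1
          funext gc j
          simp only [if_neg (show ¬dir = 3 from by omega), if_pos h1]
          by_cases hrc : PySem.List.pyGetD pos 0 0 - length ≤ i ∧ i < PySem.List.pyGetD pos 0 0
          · rw [if_pos hrc, if_pos hrc]
            by_cases hj : j = PySem.List.pyGetD pos 1 0
            · simp [hj, show ¬(PySem.List.pyGetD pos 1 0 = PySem.List.pyGetD pos 1 0 + 1) from by omega]
            · by_cases hj2 : j = PySem.List.pyGetD pos 1 0 + 1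
              · simp [hj2, show ¬(PySem.List.pyGetD pos 1 0 + 1 = PySem.List.pyGetD pos 1 0) from by omega]
              · simp [hj, hj2]
          · rw [if_neg hrc, if_neg hrc]
        · rw [if_neg (show ¬dir = 1 from by omega), if_neg (show ¬dir = 3 from by omega), if_pos h2]
          refine Eq.trans ?_ (pv_horiz (PySem.List.pyGetD pos 0 0) (PySem.List.pyGetD pos 1 0 - length) (PySem.List.pyGetD pos 1 0) 'W' '.'
            grid.length (PySem.List.pyGetD grid 0 "").toList.length grid rfl)
          apply PySem.List.foldl_congr_mem
          intro acc i _
          congr 1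
          funext gc j
          simp only [if_neg (show ¬dir = 3 from by omega), if_neg (show ¬dir = 1 from by omega),
            if_neg (show ¬dir = 4 from by omega), if_pos h2]
          by_cases hjc : PySem.List.pyGetD pos 1 0 - length ≤ j ∧ j < PySem.List.pyGetD pos 1 0
          · rw [if_pos hjc, if_pos hjc]
            by_cases hir : i = PySem.List.pyGetD pos 0 0
            · simp [hir, show ¬(PySem.List.pyGetD pos 0 0 = PySem.List.pyGetD pos 0 0 + 1) from by omega]
            · by_cases hir2 : i = PySem.List.pyGetD pos 0 0 + 1
              · simp [hir2, show ¬(PySem.List.pyGetD pos 0 0 + 1 = PySem.List.pyGetD pos 0 0) from by omega]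
              · simp [hir, hir2]
          · rw [if_neg hjc, if_neg hjc]
        · rw [if_neg (show ¬dir = 1 from by omega), if_pos h3]
          refine Eq.trans ?_ (pv_vert (PySem.List.pyGetD pos 0 0)
            (PySem.List.pyGetD pos 0 0 + length) (PySem.List.pyGetD pos 1 0) 'W' '.'
            grid.length (PySem.List.pyGetD grid 0 "").toList.length grid)
          apply PySem.List.foldl_congr_mem
          intro acc i _
          congr 1
          funext gc j
          simp only [if_pos h3]
          by_cases hrc : PySem.List.pyGetD pos 0 0 ≤ i ∧ i < PySem.List.pyGetD pos 0 0 + length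
          · rw [if_pos hrc, if_pos hrc]
            by_cases hj : j = PySem.List.pyGetD pos 1 0
            · simp [hj, show ¬(PySem.List.pyGetD pos 1 0 = PySem.List.pyGetD pos 1 0 + 1) from by omega]
            · by_cases hj2 : j = PySem.List.pyGetD pos 1 0 + 1
              · simp [hj2, show ¬(PySem.List.pyGetD pos 1 0 + 1 = PySem.List.pyGetD pos 1 0) from by omega]
              · simp [hj, hj2]
          · rw [if_neg hrc, if_neg hrc]
        · rw [if_neg (show ¬dir = 1 from by omega), if_neg (show ¬dir = 3 from by omega),
            if_neg (show ¬dir = 2 from by omega)]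
          refine Eq.trans ?_ (pv_horiz (PySem.List.pyGetD pos 0 0) (PySem.List.pyGetD pos 1 0) (PySem.List.pyGetD pos 1 0 + length) '.' 'W'
            grid.length (PySem.List.pyGetD grid 0 "").toList.length grid rfl)
          apply PySem.List.foldl_congr_mem
          intro acc i _
          congr 1
          funext gc j
          simp only [if_neg (show ¬dir = 3 from by omega), if_neg (show ¬dir = 1 from by omega),
            if_pos h4]
          by_cases hjc : PySem.List.pyGetD pos 1 0 ≤ j ∧ j < PySem.List.pyGetD pos 1 0 + length
          · rw [if_pos hjc, if_pos hjc]
            by_cases hir : i = PySem.List.pyGetD pos 0 0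
            · simp [hir, show ¬(PySem.List.pyGetD pos 0 0 = PySem.List.pyGetD pos 0 0 + 1) from by omega]
            · by_cases hir2 : i = PySem.List.pyGetD pos 0 0 + 1
              · simp [hir2, show ¬(PySem.List.pyGetD pos 0 0 + 1 = PySem.List.pyGetD pos 0 0) from by omega]
              · simp [hir, hir2]
          · rw [if_neg hjc, if_neg hjc]
  · rw [if_pos (Or.inl hd)]
    simp only [if_neg (fun h => hd (Or.inr (Or.inr (Or.inl h)))),
      if_neg (fun h => hd (Or.inl h)),
      if_neg (fun h => hd (Or.inr (Or.inr (Or.inr h)))),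
      if_neg (fun h => hd (Or.inr (Or.inl h))), pv_foldl_fixed]
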